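-- pv_equiv track=rewrite | github.com/vblancoOR/mgf_autocatalysis | auxiliar.py | convierteDiccionarioDeTiempoYNombre
-- ===== SOURCE A (Python) =====
-- def convierteDiccionarioDeTiempoYNombre(xx, names):
--     dictNames = dict(zip(range(len(names)), names))
--     ts = list(set([j for i, j in xx]))
--     ts.sort()
--     dictXx = {}
--     for t in ts:
--         lista_t = []
--         for i, j in xx:
--             if j == t:
--                 lista_t.append(dictNames[i])
--         dictXx[t] = lista_t
--
--     return dictXx
-- ===== SOURCE B (Python) =====
-- def convierteDiccionarioDeTiempoYNombre(xx, names):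
--     dictNames = dict(zip(range(len(names)), names))
--     pairs = sorted(xx, key=lambda p: p[1])
--     dictXx = {}
--     k = 0
--     n = len(pairs)
--     while k < n:
--         t = pairs[k][1]
--         grupo = []
--         while k < n and pairs[k][1] == t:
--             grupo.append(dictNames[pairs[k][0]])
--             k += 1
--         dictXx[t] = grupo
--     return dictXx
-- ===== Notes on version B (the rewrite author's own statement) =====
-- stated objective: alternative
-- what changed: Instead of building the set of times and rescanning all of xx once per distinct time, B stably sorts the pairs by time once and emits each group in a single linear group-by sweep.
import Mathlib
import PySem

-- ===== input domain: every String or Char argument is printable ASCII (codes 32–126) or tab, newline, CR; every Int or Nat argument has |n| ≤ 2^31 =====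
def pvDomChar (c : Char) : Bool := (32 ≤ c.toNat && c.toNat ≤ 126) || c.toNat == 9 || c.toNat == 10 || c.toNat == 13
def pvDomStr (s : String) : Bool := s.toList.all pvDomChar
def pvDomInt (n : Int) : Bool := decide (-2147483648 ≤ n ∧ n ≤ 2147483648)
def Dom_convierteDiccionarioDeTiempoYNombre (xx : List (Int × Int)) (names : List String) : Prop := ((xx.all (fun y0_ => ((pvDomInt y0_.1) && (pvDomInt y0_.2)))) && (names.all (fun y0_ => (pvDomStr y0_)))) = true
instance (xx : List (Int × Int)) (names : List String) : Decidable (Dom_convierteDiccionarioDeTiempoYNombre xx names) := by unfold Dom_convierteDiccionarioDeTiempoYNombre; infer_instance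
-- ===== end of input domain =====

-- B replaces A's rescan of all of xx for every distinct time by one stable sort by time
-- followed by a single linear group-by sweep.

-- ===== PORT A =====
-- dictNames = dict(zip(range(len(names)), names)) — identical line in both Pythons
def pvDictNames (names : List String) : PySem.Dict Int String :=
  PySem.Dict.ofList (((List.range names.length).map (fun n => (n : Int))).zip names)

-- dictNames[i] is ported as `getD … ""`, the total form of the lookup; Pre_ guarantees the key is present
def convierteDiccionarioDeTiempoYNombre (xx : List (Int × Int)) (names : List String) : List (Int × List String) :=
  let dictNames := pvDictNames names
  let ts := PySem.List.sorted (PySem.Set.ofList (xx.map (fun p => p.2))) (fun t => t) false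
  (ts.foldl (fun d t =>
      d.insert t (xx.foldl (fun l p => if p.2 == t then l ++ [dictNames.getD p.1 ""] else l) []))
    PySem.Dict.empty).items

-- ===== PORT B =====
-- the outer/inner while loops of Source B: consume one run of equal times, recurse on the remainder
def pvAgrupa (dn : PySem.Dict Int String) : List (Int × Int) → List (Int × List String)
  | [] => []
  | p :: rest =>
      (p.2, dn.getD p.1 "" :: (rest.takeWhile (fun q => q.2 == p.2)).map (fun q => dn.getD q.1 ""))
        :: pvAgrupa dn (rest.dropWhile (fun q => q.2 == p.2))
termination_by l => l.length
decreasing_by simpa using Nat.lt_succ_of_le (List.Sublist.length_le (List.dropWhile_sublist _))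

def convierteDiccionarioDeTiempoYNombre_alt (xx : List (Int × Int)) (names : List String) : List (Int × List String) :=
  pvAgrupa (pvDictNames names) (PySem.List.sorted xx (fun p => p.2) false)

-- ===== PRECONDITION & SPEC =====
-- Pre_ excludes exactly the inputs on which the Python raises KeyError: a pair whose index is
-- not a key of dictNames, i.e. negative or ≥ len(names).
def Pre_convierteDiccionarioDeTiempoYNombre (xx : List (Int × Int)) (names : List String) : Prop :=
  ∀ p ∈ xx, 0 ≤ p.1 ∧ p.1 < (names.length : Int)
instance (xx : List (Int × Int)) (names : List String) : Decidable (Pre_convierteDiccionarioDeTiempoYNombre xx names) := by unfold Pre_convierteDiccionarioDeTiempoYNombre; infer_instance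

def pvWitness_convierteDiccionarioDeTiempoYNombre : (List (Int × Int)) × List String :=
  ([(0, 3), (1, 2), (0, 2)], ["a", "b"])

def Spec_convierteDiccionarioDeTiempoYNombre (xx : List (Int × Int)) (names : List String) (out : List (Int × List String)) : Prop := out = convierteDiccionarioDeTiempoYNombre_alt xx names
instance (xx : List (Int × Int)) (names : List String) (out : List (Int × List String)) : Decidable (Spec_convierteDiccionarioDeTiempoYNombre xx names out) := by unfold Spec_convierteDiccionarioDeTiempoYNombre; infer_instance

-- ===== CLAIM (what is proved, stated in full; the proofs are below) =====
def Claim_equal_convierteDiccionarioDeTiempoYNombre : Prop := ∀ (xx : List (Int × Int)) (names : List String), Dom_convierteDiccionarioDeTiempoYNombre xx names → Pre_convierteDiccionarioDeTiempoYNombre xx names → Spec_convierteDiccionarioDeTiempoYNombre xx names (convierteDiccionarioDeTiempoYNombre xx names)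

-- ===== LEMMAS AND PROOFS =====

-- folding Dict.insert over pairwise-distinct fresh keys appends the items in order
theorem pvDict_fold_insert (g : Int → List String) :
    ∀ (ts : List Int) (d : PySem.Dict Int (List String)), ts.Nodup →
      (∀ t ∈ ts, d.contains t = false) →
      (ts.foldl (fun d t => d.insert t (g t)) d).items = d.items ++ ts.map (fun t => (t, g t)) := by
  intro ts
  induction ts with
  | nil => intro d _ _; simp
  | cons t ts ih =>
    intro d hnd hc
    simp only [List.foldl_cons]
    rw [ih _ (List.nodup_cons.mp hnd).2]
    · rw [PySem.Dict.items_insert_of_not_contains _ _ (hc t (by simp))]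
      simp
    · intro t' ht'
      rw [PySem.Dict.contains_insert]
      have : t' ≠ t := fun h => (List.nodup_cons.mp hnd).1 (h ▸ ht')
      simp [this, hc t' (List.mem_cons_of_mem _ ht')]

-- A's nested loops compute: for each sorted distinct time t, the filtered-and-looked-up list.
theorem pvA_char (xx : List (Int × Int)) (names : List String) :
    convierteDiccionarioDeTiempoYNombre xx names =
      (PySem.List.sorted (PySem.Set.ofList (xx.map (fun p => p.2))) (fun t => t) false).map
        (fun t => (t, (xx.filter (fun p => p.2 == t)).map (fun q => (pvDictNames names).getD q.1 ""))) := by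
  unfold convierteDiccionarioDeTiempoYNombre
  simp only [PySem.List.foldl_append_if, List.nil_append]
  rw [pvDict_fold_insert]
  · simp [PySem.Dict.empty]
  · exact ((PySem.List.sorted_perm _ _ _).nodup_iff).mpr (PySem.Set.nodup_ofList _)
  · intro t _; exact PySem.Dict.contains_empty t


-- filtering one time-class commutes with one sorted-insertion step (stability, one step)
theorem pvFilter_insertBy (t : Int) (x : Int × Int) :
    ∀ (acc : List (Int × Int)), acc.Pairwise (fun a b => a.2 ≤ b.2) →
      (PySem.List.insertBy (fun a b => decide (a.2 < b.2)) x acc).filter (fun p => p.2 == t)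
        = if x.2 == t then acc.filter (fun p => p.2 == t) ++ [x]
          else acc.filter (fun p => p.2 == t) := by
  intro acc
  induction acc with
  | nil => intro _; simp only [PySem.List.insertBy, List.filter_nil]; split <;> simp_all
  | cons y ys ih =>
    intro hpw
    obtain ⟨hy, hys⟩ := List.pairwise_cons.mp hpw
    simp only [PySem.List.insertBy]
    by_cases hlt : x.2 < y.2
    · simp only [hlt, decide_true, if_true]
      by_cases hxt : x.2 == t
      · have hxt' : x.2 = t := by simpa using hxt
        have hnil : (y :: ys).filter (fun p => p.2 == t) = [] := by
          rw [List.filter_eq_nil_iff]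
          intro q hq
          have hle : y.2 ≤ q.2 := by
            rcases List.mem_cons.mp hq with h | h
            · exact h ▸ le_refl _
            · exact hy q h
          have : ¬ (q.2 = t) := by omega
          simpa using this
        simp [hxt, hnil]
      · simp [hxt]
    · simp only [hlt, decide_false, Bool.false_eq_true, if_false]
      rw [List.filter_cons, List.filter_cons, ih hys]
      by_cases hyt : y.2 == t <;> by_cases hxt : x.2 == t <;> simp [hyt, hxt]

-- stability: the time-t class of the stable sort is the time-t class of the original list
theorem pvFilter_sorted (t : Int) (l : List (Int × Int)) :
    (PySem.List.sorted l (fun p => p.2) false).filter (fun p => p.2 == t)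
      = l.filter (fun p => p.2 == t) := by
  induction l using List.reverseRecOn with
  | nil => rfl
  | append_singleton l x ih =>
    rw [PySem.List.sorted_eq_foldl_insertBy, List.foldl_append, List.foldl_cons, List.foldl_nil,
        ← PySem.List.sorted_eq_foldl_insertBy,
        pvFilter_insertBy t x _ (PySem.List.sorted_pairwise l (fun p => p.2)), ih,
        List.filter_append, List.filter_cons, List.filter_nil]
    split <;> simp

theorem pvDiscard_ofList_const (c : Int) :
    ∀ (u v : List Int), (∀ x ∈ u, x = c) → c ∉ v →
      (PySem.Set.ofList (u ++ v)).discard c = PySem.Set.ofList v := by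
  intro u
  induction u with
  | nil =>
    intro v _ hv
    simp only [List.nil_append]
    have : ∀ y ∈ PySem.Set.ofList v, (y == c) = false := by
      intro y hy
      have : y ∈ v := (PySem.Set.mem_ofList _ _).mp hy
      simp only [beq_eq_false_iff_ne]
      exact fun h => hv (h ▸ this)
    simp only [PySem.Set.discard]
    exact List.filter_eq_self.mpr (by intro a ha; simp [this a ha])
  | cons u0 us ih =>
    intro v hu hv
    have hu0 : u0 = c := hu u0 (by simp)
    subst hu0
    rw [List.cons_append, PySem.Set.ofList_cons]
    simp only [PySem.Set.discard, List.filter_cons]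
    simp only [beq_self_eq_true, Bool.not_true]
    rw [List.filter_filter]
    rw [show ∀ (w : List Int), List.filter (fun y => !y == u0 && !y == u0) w = List.filter (fun y => !y == u0) w from fun w => by
      apply List.filter_congr; intro a _; cases h : a == u0 <;> simp]
    exact ih v (fun x hx => hu x (by simp [hx])) hv

theorem pvOfList_const_block (c : Int) (u v : List Int) (hu : ∀ x ∈ u, x = c) (hv : c ∉ v) :
    PySem.Set.ofList (c :: (u ++ v)) = c :: PySem.Set.ofList v := by
  rw [PySem.Set.ofList_cons, pvDiscard_ofList_const c u v hu hv]

theorem pvOfList_sublist {α : Type} [BEq α] [LawfulBEq α] (xs : List α) :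
    (PySem.Set.ofList xs).Sublist xs := by
  induction xs using List.reverseRecOn with
  | nil => simp
  | append_singleton l x ih =>
    rw [PySem.Set.ofList_append_singleton, PySem.Set.add_eq_ite]
    split
    · exact ih.trans (List.sublist_append_left l [x])
    · exact List.Sublist.append ih (List.Sublist.refl [x])

-- after dropping the initial run of time c, every remaining time is strictly larger
theorem pvDrop_gt (c : Int) :
    ∀ (r : List (Int × Int)), (∀ q ∈ r, c ≤ q.2) → r.Pairwise (fun a b => a.2 ≤ b.2) →
      ∀ q ∈ r.dropWhile (fun q => q.2 == c), c < q.2 := by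
  intro r
  induction r with
  | nil => intro _ _ q hq; simp at hq
  | cons r0 rs ih =>
    intro hle hpw
    obtain ⟨h0, hps⟩ := List.pairwise_cons.mp hpw
    by_cases h : (r0.2 == c) = true
    · rw [List.dropWhile_cons, if_pos h]
      exact ih (fun q hq => hle q (List.mem_cons_of_mem _ hq)) hps
    · rw [List.dropWhile_cons, if_neg h]
      intro q hq
      have hne : r0.2 ≠ c := by simpa using h
      have hc0 : c < r0.2 := lt_of_le_of_ne (hle r0 (by simp)) (Ne.symm hne)
      rcases List.mem_cons.mp hq with rfl | hq'
      · exact hc0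
      · exact lt_of_lt_of_le hc0 (h0 q hq')

-- the group-by sweep over a time-sorted list produces, for each first-occurrence distinct time,
-- exactly that time's filtered class
theorem pvAgrupa_char (dn : PySem.Dict Int String) :
    ∀ (s : List (Int × Int)), s.Pairwise (fun a b => a.2 ≤ b.2) →
      pvAgrupa dn s = (PySem.Set.ofList (s.map (fun p => p.2))).map
        (fun t => (t, (s.filter (fun p => p.2 == t)).map (fun q => dn.getD q.1 ""))) := by
  intro s
  induction s using pvAgrupa.induct with
  | case1 => intro _; rw [pvAgrupa]; rfl
  | case2 p rest ih =>
    intro hpw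
    obtain ⟨h1, hrest⟩ := List.pairwise_cons.mp hpw
    have htk_eq : ∀ q ∈ rest.takeWhile (fun q => q.2 == p.2), q.2 = p.2 := by
      intro q hq; simpa using List.mem_takeWhile_imp hq
    have hdr_gt : ∀ q ∈ rest.dropWhile (fun q => q.2 == p.2), p.2 < q.2 :=
      pvDrop_gt p.2 rest h1 hrest
    have hdr_pw : (rest.dropWhile (fun q => q.2 == p.2)).Pairwise (fun a b => a.2 ≤ b.2) :=
      List.Pairwise.sublist (List.dropWhile_sublist _) hrest
    have e_rest : rest.takeWhile (fun q => q.2 == p.2) ++ rest.dropWhile (fun q => q.2 == p.2) = rest :=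
      List.takeWhile_append_dropWhile
    -- the time-p.2 class of the whole list is p followed by the run
    have e1 : (p :: rest).filter (fun q => q.2 == p.2) = p :: rest.takeWhile (fun q => q.2 == p.2) := by
      have efr : rest.filter (fun q => q.2 == p.2) = rest.takeWhile (fun q => q.2 == p.2) := by
        conv_lhs => rw [← e_rest]
        rw [List.filter_append,
            List.filter_eq_self.mpr (fun q hq => by simp [htk_eq q hq]),
            List.filter_eq_nil_iff.mpr (fun q hq => by have := hdr_gt q hq; simp; omega),
            List.append_nil]
      rw [List.filter_cons, if_pos (by simp), efr]
    -- later classes ignore p and the run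
    have e2 : ∀ t, p.2 < t →
        (p :: rest).filter (fun q => q.2 == t) = (rest.dropWhile (fun q => q.2 == p.2)).filter (fun q => q.2 == t) := by
      intro t ht
      have efr : rest.filter (fun q => q.2 == t) = (rest.dropWhile (fun q => q.2 == p.2)).filter (fun q => q.2 == t) := by
        conv_lhs => rw [← e_rest]
        rw [List.filter_append,
            List.filter_eq_nil_iff.mpr (fun q hq => by have := htk_eq q hq; simp; omega),
            List.nil_append]
      rw [List.filter_cons, if_neg (by simp; omega), efr]
    -- the distinct times of the whole list are p.2 followed by those of the remainder
    have e3 : PySem.Set.ofList ((p :: rest).map (fun q => q.2))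
        = p.2 :: PySem.Set.ofList ((rest.dropWhile (fun q => q.2 == p.2)).map (fun q => q.2)) := by
      have emap : (p :: rest).map (fun q => q.2)
          = p.2 :: ((rest.takeWhile (fun q => q.2 == p.2)).map (fun q => q.2)
              ++ (rest.dropWhile (fun q => q.2 == p.2)).map (fun q => q.2)) := by
        rw [← List.map_append, e_rest, List.map_cons]
      rw [emap]
      exact pvOfList_const_block p.2 _ _
        (fun x hx => by obtain ⟨q, hq, rfl⟩ := List.mem_map.mp hx; exact htk_eq q hq)
        (fun hx => by obtain ⟨q, hq, hq2⟩ := List.mem_map.mp hx; have := hdr_gt q hq; omega)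
    rw [pvAgrupa, ih hdr_pw, e3, List.map_cons]
    congr 1
    · rw [e1]; rfl
    · refine List.map_congr_left (fun t ht => ?_)
      have : p.2 < t := by
        obtain ⟨q, hq, rfl⟩ := List.mem_map.mp ((PySem.Set.mem_ofList _ _).mp ht)
        exact hdr_gt q hq
      rw [e2 t this]

-- the first-occurrence distinct times of the time-sorted list ARE sorted(set(times))
theorem pvKeys_char (l : List (Int × Int)) :
    PySem.Set.ofList ((PySem.List.sorted l (fun p => p.2) false).map (fun p => p.2))
      = PySem.List.sorted (PySem.Set.ofList (l.map (fun p => p.2))) (fun t => t) false := by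
  refine Eq.symm (PySem.List.sorted_eq_of_perm_of_pairwise_lt _ _ _ ?_ ?_)
  · rw [List.perm_ext_iff_of_nodup (PySem.Set.nodup_ofList _) (PySem.Set.nodup_ofList _)]
    intro a
    simp only [PySem.Set.mem_ofList]
    exact ((PySem.List.sorted_perm l (fun p => p.2) false).map (fun p => p.2)).mem_iff
  · have hle := List.Pairwise.sublist (pvOfList_sublist _) (PySem.List.sorted_map_key_pairwise l (fun p => p.2))
    have hne : (PySem.Set.ofList ((PySem.List.sorted l (fun p => p.2) false).map (fun p => p.2))).Pairwise (fun a b => a ≠ b) :=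
      PySem.Set.nodup_ofList _
    exact (hle.and hne).imp (fun h => lt_of_le_of_ne h.1 h.2)

-- ===== VERDICT (by name: the statement is the Claim_ definition above) =====
theorem convierteDiccionarioDeTiempoYNombre_spec : Claim_equal_convierteDiccionarioDeTiempoYNombre := by
  intro xx names _ _
  unfold Spec_convierteDiccionarioDeTiempoYNombre
  rw [pvA_char]
  unfold convierteDiccionarioDeTiempoYNombre_alt
  rw [pvAgrupa_char _ _ (PySem.List.sorted_pairwise xx (fun p => p.2)), pvKeys_char]
  exact (List.map_congr_left (fun t _ => by rw [pvFilter_sorted])).symm
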